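-- pv_equiv track=rewrite | github.com/fosslight-oss/if-you-are-rich-then-do-not-solve-algorithm | hello70825/programmers_138476.py | solution
-- ===== SOURCE A (Python) =====
-- from collections import defaultdict as dfd
--
-- def solution(k, tangerine):
--     dd = dfd(lambda: 0)
--     for x in tangerine:
--         dd[x] += 1
--     a = [*dd.keys()]
--     a.sort(key=lambda x: dd[x], reverse=True)
--
--     val = 0
--     answer = 0
--     for x in a:
--         val += dd[x]
--         answer += 1
--         if val >= k: break
--
--     return answer
-- ===== SOURCE B (Python) =====
-- def solution(k, tangerine):
--     cnt = {}
--     for x in tangerine: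
--         cnt[x] = cnt.get(x, 0) + 1
--     buckets = {}
--     for c in cnt.values():
--         buckets[c] = buckets.get(c, 0) + 1
--     total = 0
--     groups = 0
--     for c in range(len(tangerine), 0, -1):
--         for _ in range(buckets.get(c, 0)):
--             total += c
--             groups += 1
--             if total >= k:
--                 return groups
--     return groups
-- ===== Notes on version B (the rewrite author's own statement) =====
-- stated objective: alternative
-- what changed: Replaces the comparison sort of groups by their counts with a bucket pass: a counter of counts is built and the possible count values are walked from len(tangerine) down to 1, emitting groups directly, so no sort happens (O(n) vs O(n log n); measured only ~1.3x at the largest size, so no speed is claimed).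
import Mathlib
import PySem

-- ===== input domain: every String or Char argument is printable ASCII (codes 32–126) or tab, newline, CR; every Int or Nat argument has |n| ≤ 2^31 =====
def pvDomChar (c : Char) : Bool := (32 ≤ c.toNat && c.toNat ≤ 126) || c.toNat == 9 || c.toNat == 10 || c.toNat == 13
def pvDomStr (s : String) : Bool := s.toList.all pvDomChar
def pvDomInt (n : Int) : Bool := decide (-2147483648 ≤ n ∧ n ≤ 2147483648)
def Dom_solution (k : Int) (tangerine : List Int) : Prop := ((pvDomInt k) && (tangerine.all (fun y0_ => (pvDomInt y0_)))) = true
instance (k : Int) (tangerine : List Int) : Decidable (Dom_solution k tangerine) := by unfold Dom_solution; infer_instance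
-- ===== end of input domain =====

-- B replaces A's comparison sort of the groups by their counts with a bucket pass over
-- the possible count values (a counter of counts, walked from len(tangerine) down to 1).

-- ===== PORT A =====
-- the 'for x in a: val += dd[x]; answer += 1; if val >= k: break' loop of A
def solutionLoopA (k : Int) (dd : PySem.Dict Int Int) : List Int → Int → Int → Int
  | [], _, answer => answer
  | x :: rest, val, answer =>
    let val := val + dd.getD x 0
    let answer := answer + 1
    if val ≥ k then answer else solutionLoopA k dd rest val answer

def solution (k : Int) (tangerine : List Int) : Int :=
  let dd := tangerine.foldl (fun d x => d.modify x 0 (· + 1)) PySem.Dict.empty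
  let a := dd.keys
  let a := PySem.List.sorted a (fun x => dd.getD x 0) true
  solutionLoopA k dd a 0 0

-- ===== PORT B =====
-- inner 'for _ in range(buckets.get(c, 0)): …' loop; Sum.inr = early 'return groups'
def solutionAltInner (k c : Int) : Nat → Int → Int → (Int × Int) ⊕ Int
  | 0, total, groups => Sum.inl (total, groups)
  | n + 1, total, groups =>
    let total := total + c
    let groups := groups + 1
    if total ≥ k then Sum.inr groups else solutionAltInner k c n total groups

-- outer 'for c in range(len(tangerine), 0, -1): …' loop
def solutionAltOuter (k : Int) (buckets : PySem.Dict Int Int) : List Int → Int → Int → Int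
  | [], _, groups => groups
  | c :: cs, total, groups =>
    match solutionAltInner k c (buckets.getD c 0).toNat total groups with
    | Sum.inr ans => ans
    | Sum.inl (t, g) => solutionAltOuter k buckets cs t g

def solution_alt (k : Int) (tangerine : List Int) : Int :=
  let cnt := tangerine.foldl (fun d x => d.insert x (d.getD x 0 + 1)) PySem.Dict.empty
  let buckets := cnt.values.foldl (fun d c => d.insert c (d.getD c 0 + 1)) PySem.Dict.empty
  solutionAltOuter k buckets (PySem.List.pyRange (tangerine.length : Int) 0 (-1)) 0 0

-- ===== PRECONDITION & SPEC =====
def Spec_solution (k : Int) (tangerine : List Int) (out : Int) : Prop := out = solution_alt k tangerine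
instance (k : Int) (tangerine : List Int) (out : Int) : Decidable (Spec_solution k tangerine out) := by unfold Spec_solution; infer_instance

-- ===== CLAIM (what is proved, stated in full; the proofs are below) =====
def Claim_equal_solution : Prop := ∀ (k : Int) (tangerine : List Int), Dom_solution k tangerine → Spec_solution k tangerine (solution k tangerine)

-- ===== LEMMAS AND PROOFS =====

-- common abstraction: scan a list of group sizes, stop once the running total reaches k
def pvScan (k : Int) : List Int → Int → Int → Int
  | [], _, groups => groups
  | v :: vs, total, groups =>
    if total + v ≥ k then groups + 1 else pvScan k vs (total + v) (groups + 1)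

theorem loopA_eq_scan (k : Int) (dd : PySem.Dict Int Int) (xs : List Int)
    (val ans : Int) :
    solutionLoopA k dd xs val ans = pvScan k (xs.map (fun x => dd.getD x 0)) val ans := by
  induction xs generalizing val ans with
  | nil => rfl
  | cons x rest ih =>
      simp only [solutionLoopA, List.map, pvScan]
      split <;> simp [ih]

theorem inner_eq_scan (k c : Int) (n : Nat) (total groups : Int) (rest : List Int) :
    pvScan k (List.replicate n c ++ rest) total groups =
      (match solutionAltInner k c n total groups with
       | Sum.inr ans => ans
       | Sum.inl (t, g) => pvScan k rest t g) := by
  induction n generalizing total groups with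
  | zero => rfl
  | succ m ih =>
      simp only [List.replicate, List.cons_append, pvScan, solutionAltInner]
      split
      · rfl
      · exact ih _ _

theorem outer_eq_scan (k : Int) (buckets : PySem.Dict Int Int) (cs : List Int)
    (total groups : Int) :
    solutionAltOuter k buckets cs total groups =
      pvScan k (cs.flatMap (fun c => List.replicate (buckets.getD c 0).toNat c)) total groups := by
  induction cs generalizing total groups with
  | nil => rfl
  | cons c cs ih =>
      simp only [solutionAltOuter, List.flatMap_cons]
      rw [inner_eq_scan]
      cases h : solutionAltInner k c (buckets.getD c 0).toNat total groups with
      | inr ans => rfl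
      | inl tg => cases tg with | mk t g => simp [ih]

-- blocks of equal values listed for strictly decreasing c give a descending list
theorem flatMap_replicate_pairwise (l : List Int) (m : Int → Nat)
    (hl : l.Pairwise (fun a b => b < a)) :
    (l.flatMap (fun c => List.replicate (m c) c)).Pairwise (fun a b => b ≤ a) := by
  induction l with
  | nil => simp
  | cons c cs ih =>
      rcases List.pairwise_cons.mp hl with ⟨hc, hcs⟩
      simp only [List.flatMap_cons]
      apply List.pairwise_append.mpr
      refine ⟨?_, ih hcs, ?_⟩
      · exact List.pairwise_replicate.mpr (Or.inr le_rfl)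
      · intro a ha b hb
        rcases List.mem_replicate.mp ha with ⟨-, rfl⟩
        rcases List.mem_flatMap.mp hb with ⟨d, hd, hb'⟩
        rcases List.mem_replicate.mp hb' with ⟨-, rfl⟩
        exact le_of_lt (hc _ hd)

theorem count_flatMap_replicate (l : List Int) (m : Int → Nat) (v : Int)
    (hl : l.Nodup) :
    (l.flatMap (fun c => List.replicate (m c) c)).count v =
      if v ∈ l then m v else 0 := by
  induction l with
  | nil => simp
  | cons c cs ih =>
      rcases List.nodup_cons.mp hl with ⟨hc, hcs⟩
      simp only [List.flatMap_cons, List.count_append, ih hcs, List.count_replicate,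
        List.mem_cons]
      by_cases hv : v = c
      · subst hv
        simp [hc]
      · simp [hv, Ne.symm hv]

theorem pyRange_countdown_pairwise (n : Int) :
    (PySem.List.pyRange n 0 (-1)).Pairwise (fun a b => b < a) := by
  rw [PySem.List.pyRange_neg_one]
  refine List.Pairwise.map _ ?_ (List.pairwise_lt_range)
  intro a b hab
  omega

theorem scan_descending (L1 L2 : List Int)
    (hperm : L1.Perm L2)
    (h1 : L1.Pairwise (fun a b => b ≤ a)) (h2 : L2.Pairwise (fun a b => b ≤ a)) :
    L1 = L2 :=
  List.Perm.eq_of_pairwise' h1 h2 hperm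

-- the multiset of group sizes B emits is exactly Counter(tangerine).values
theorem flatMap_perm_vals (n : Int) (vals : List Int)
    (hmem : ∀ v ∈ vals, 1 ≤ v ∧ v ≤ n) :
    ((PySem.List.pyRange n 0 (-1)).flatMap
        (fun c => List.replicate (vals.count c) c)).Perm vals := by
  apply (List.perm_iff_count).mpr
  intro v
  have hnd : (PySem.List.pyRange n 0 (-1)).Nodup := by
    rw [PySem.List.pyRange_neg_one_eq_reverse]
    exact (List.nodup_reverse).mpr (PySem.List.nodup_pyRange_one _ _)
  rw [count_flatMap_replicate _ _ _ hnd]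
  by_cases hv : v ∈ PySem.List.pyRange n 0 (-1)
  · simp [hv]
  · simp only [hv, if_false]
    rw [eq_comm, List.count_eq_zero]
    intro hmem'
    rcases hmem v hmem' with ⟨h1, h2⟩
    exact hv ((PySem.List.mem_pyRange_neg_one).mpr ⟨by omega, h2⟩)

-- ===== VERDICT (by name: the statement is the Claim_ definition above) =====
theorem solution_spec : Claim_equal_solution := by
  intro k tangerine _
  show solution k tangerine = solution_alt k tangerine
  unfold solution solution_alt
  simp only [← PySem.Dict.counter_eq_foldl, PySem.Dict.foldl_insert_getD_add_one_eq_counter,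
    loopA_eq_scan, outer_eq_scan]
  set dd := PySem.Dict.counter tangerine with hdd
  set key : Int → Int := fun x => dd.getD x 0 with hkey
  set n : Int := (tangerine.length : Int) with hn
  have hbuck : ∀ c : Int, ((PySem.Dict.counter dd.values).getD c 0).toNat = dd.values.count c := by
    intro c
    rw [PySem.Dict.getD_counter]
    exact Int.toNat_natCast _
  simp only [hbuck]
  have hvals : dd.values = dd.keys.map key := by
    rw [hkey]
    exact PySem.Dict.values_eq_map_keys dd (by rw [hdd]; exact PySem.Dict.nodup_keys_counter tangerine) 0
  have hmem : ∀ v ∈ dd.values, 1 ≤ v ∧ v ≤ n := by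
    intro v hv
    rw [hvals] at hv
    rcases List.mem_map.mp hv with ⟨x, hx, rfl⟩
    rw [hdd, PySem.Dict.keys_counter] at hx
    have hxt : x ∈ tangerine := (PySem.Set.mem_ofList _ _).mp hx
    have h1 : 0 < tangerine.count x := List.count_pos_iff.mpr hxt
    have h2 : tangerine.count x ≤ tangerine.length := List.count_le_length
    have hk : key x = (tangerine.count x : Int) := by
      rw [hkey, hdd]
      exact PySem.Dict.getD_counter tangerine x
    rw [hk, hn]
    omega
  have hpermA : ((PySem.List.sorted dd.keys key true).map key).Perm dd.values := by
    rw [hvals]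
    exact (PySem.List.sorted_perm dd.keys key true).map key
  have hpermB := flatMap_perm_vals n dd.values hmem
  have hA : ((PySem.List.sorted dd.keys key true).map key).Pairwise (fun a b => b ≤ a) :=
    List.Pairwise.map key (fun a b h => h) (PySem.List.sorted_pairwise_rev dd.keys key)
  have hB := flatMap_replicate_pairwise (PySem.List.pyRange n 0 (-1))
    (fun c => dd.values.count c) (pyRange_countdown_pairwise n)
  rw [scan_descending _ _ (hpermA.trans hpermB.symm) hA hB]
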